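-- pv_equiv track=rewrite | github.com/macaulishchina/MIND | mind/access/benchmark.py | _find_support_id
-- ===== SOURCE A (Python) =====
-- def _find_support_id(
--     fragment: str,
--     support_items: list[tuple[str, str]],
-- ) -> str | None:
--     normalized_fragment = _normalize(fragment)
--     best_id: str | None = None
--     best_score = 0
--     for object_id, text in support_items:
--         normalized_text = _normalize(text)
--         if normalized_fragment and normalized_fragment in normalized_text:
--             return object_id
--         score = len(set(normalized_fragment.split()).intersection(normalized_text.split()))
--         if score > best_score:
--             best_id = object_id
--             best_score = score
--     return best_id if best_score > 0 else None
--
-- def _normalize(text: str) -> str: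
--     return " ".join(text.lower().split())
-- ===== SOURCE B (Python) =====
-- def _find_support_id(
--     fragment: str,
--     support_items: list[tuple[str, str]],
-- ) -> str | None:
--     # Two passes instead of one interleaved loop: substring matching first,
--     # then (only if none matched) token-overlap scoring.
--     normalized_fragment = _normalize(fragment)
--     if normalized_fragment:
--         for object_id, text in support_items:
--             if normalized_fragment in _normalize(text):
--                 return object_id
--     fragment_tokens = set(normalized_fragment.split())
--     best_id = None
--     best_score = 0
--     for object_id, text in support_items:
--         score = len(fragment_tokens.intersection(_normalize(text).split()))
--         if score > best_score:
--             best_id = object_id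
--             best_score = score
--     return best_id
--
--
-- def _normalize(text: str) -> str:
--     return " ".join(text.lower().split())
-- ===== Notes on version B (the rewrite author's own statement) =====
-- stated objective: alternative
-- what changed: A's single interleaved loop (early-return substring test mixed with running best-score bookkeeping) is split into two sequential passes: a pure first-substring-match scan, and only if it fails a separate best-token-overlap scoring scan; the final 'best_id if best_score else None' conditional disappears.
import Mathlib
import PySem

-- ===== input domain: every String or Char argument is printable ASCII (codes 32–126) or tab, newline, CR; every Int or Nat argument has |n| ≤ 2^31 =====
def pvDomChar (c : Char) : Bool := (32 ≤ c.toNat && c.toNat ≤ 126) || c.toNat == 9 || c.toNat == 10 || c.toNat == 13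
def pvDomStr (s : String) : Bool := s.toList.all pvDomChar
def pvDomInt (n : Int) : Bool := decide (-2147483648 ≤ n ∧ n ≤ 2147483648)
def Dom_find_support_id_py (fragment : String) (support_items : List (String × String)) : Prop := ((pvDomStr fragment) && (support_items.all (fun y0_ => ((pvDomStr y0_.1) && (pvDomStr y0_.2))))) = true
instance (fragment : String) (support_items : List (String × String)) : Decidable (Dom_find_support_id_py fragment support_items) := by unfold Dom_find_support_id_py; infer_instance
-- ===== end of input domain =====

-- B replaces A's single interleaved loop by two sequential passes (substring scan, then
-- token-overlap scan); same outputs on all inputs (objective: alternative decomposition).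

-- ===== PORT A =====
-- _normalize(text) = " ".join(text.lower().split())
def pvNormalize (text : String) : String :=
  PySem.Str.join " " (PySem.Str.split₀ (PySem.Str.lower text))

-- the for-loop of A: state (best_id, best_score); early return on substring hit
def pvLoopA (nf : String) : List (String × String) → Option String → Nat → Option String
  | [], bid, bsc => if bsc > 0 then bid else none
  | (oid, text) :: rest, bid, bsc =>
    let nt := pvNormalize text
    if nf ≠ "" ∧ PySem.Str.isIn nf nt = true then some oid
    else
      let score := (PySem.Set.inter (PySem.Set.ofList (PySem.Str.split₀ nf)) (PySem.Str.split₀ nt)).length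
      if score > bsc then pvLoopA nf rest (some oid) score
      else pvLoopA nf rest bid bsc

def find_support_id_py (fragment : String) (support_items : List (String × String)) : Option String :=
  pvLoopA (pvNormalize fragment) support_items none 0

-- ===== PORT B =====
-- first pass: first object_id whose normalized text contains nf
def pvFirstSub (nf : String) : List (String × String) → Option String
  | [] => none
  | (oid, text) :: rest =>
    if PySem.Str.isIn nf (pvNormalize text) = true then some oid else pvFirstSub nf rest

-- second pass: object_id with the strictly greatest positive token overlap, first wins
def pvBest (ft : PySem.Set String) : List (String × String) → Option String → Nat → Option String
  | [], bid, _ => bid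
  | (oid, text) :: rest, bid, bsc =>
    let score := (PySem.Set.inter ft (PySem.Str.split₀ (pvNormalize text))).length
    if score > bsc then pvBest ft rest (some oid) score
    else pvBest ft rest bid bsc

def find_support_id_py_alt (fragment : String) (support_items : List (String × String)) : Option String :=
  let nf := pvNormalize fragment
  match (if nf = "" then none else pvFirstSub nf support_items) with
  | some oid => some oid
  | none => pvBest (PySem.Set.ofList (PySem.Str.split₀ nf)) support_items none 0

-- ===== PRECONDITION & SPEC =====
def Spec_find_support_id_py (fragment : String) (support_items : List (String × String)) (out : Option String) : Prop := out = find_support_id_py_alt fragment support_items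
instance (fragment : String) (support_items : List (String × String)) (out : Option String) : Decidable (Spec_find_support_id_py fragment support_items out) := by unfold Spec_find_support_id_py; infer_instance

-- ===== CLAIM (what is proved, stated in full; the proofs are below) =====
def Claim_equal_find_support_id_py : Prop := ∀ (fragment : String) (support_items : List (String × String)), Dom_find_support_id_py fragment support_items → Spec_find_support_id_py fragment support_items (find_support_id_py fragment support_items)

-- ===== LEMMAS AND PROOFS =====

-- A's interleaved loop equals: first substring hit if any, else B's scoring loop,
-- for any start state satisfying the invariant "score 0 means no best yet".
lemma pvLoopA_eq (nf : String) :
    ∀ (items : List (String × String)) (bid : Option String) (bsc : Nat),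
      (bsc = 0 → bid = none) →
      pvLoopA nf items bid bsc =
        match (if nf = "" then none else pvFirstSub nf items) with
        | some oid => some oid
        | none => pvBest (PySem.Set.ofList (PySem.Str.split₀ nf)) items bid bsc := by
  intro items
  induction items with
  | nil =>
    intro bid bsc hinv
    show (if bsc > 0 then bid else none) =
      match (if nf = "" then (none : Option String) else none) with
      | some oid => some oid
      | none => bid
    rw [ite_self]
    cases bsc with
    | zero => simpa using (hinv rfl).symm
    | succ n => simp
  | cons hd rest ih =>
    intro bid bsc hinv
    obtain ⟨oid, text⟩ := hd
    by_cases hguard : nf ≠ "" ∧ PySem.Str.isIn nf (pvNormalize text) = true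
    · -- substring hit at the head: A returns early, B's first pass returns here too
      show (if nf ≠ "" ∧ PySem.Str.isIn nf (pvNormalize text) = true then some oid
            else if (PySem.Set.inter (PySem.Set.ofList (PySem.Str.split₀ nf)) (PySem.Str.split₀ (pvNormalize text))).length > bsc
              then pvLoopA nf rest (some oid) (PySem.Set.inter (PySem.Set.ofList (PySem.Str.split₀ nf)) (PySem.Str.split₀ (pvNormalize text))).length
              else pvLoopA nf rest bid bsc) = _
      rw [if_pos hguard, if_neg hguard.1]
      have hfs : pvFirstSub nf ((oid, text) :: rest) = some oid := by
        show (if PySem.Str.isIn nf (pvNormalize text) = true then some oid else pvFirstSub nf rest) = some oid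
        rw [if_pos hguard.2]
      rw [hfs]
    · -- no hit at the head: both loops take their scoring / skipping step
      have hfs : (if nf = "" then none else pvFirstSub nf ((oid, text) :: rest)) =
          (if nf = "" then none else pvFirstSub nf rest) := by
        by_cases hnf : nf = ""
        · rw [if_pos hnf, if_pos hnf]
        · rw [if_neg hnf, if_neg hnf]
          show (if PySem.Str.isIn nf (pvNormalize text) = true then some oid else pvFirstSub nf rest) = _
          exact if_neg (fun hin => hguard ⟨hnf, hin⟩)
      show (if nf ≠ "" ∧ PySem.Str.isIn nf (pvNormalize text) = true then some oid
            else if (PySem.Set.inter (PySem.Set.ofList (PySem.Str.split₀ nf)) (PySem.Str.split₀ (pvNormalize text))).length > bsc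
              then pvLoopA nf rest (some oid) (PySem.Set.inter (PySem.Set.ofList (PySem.Str.split₀ nf)) (PySem.Str.split₀ (pvNormalize text))).length
              else pvLoopA nf rest bid bsc) = _
      rw [if_neg hguard, hfs]
      by_cases hsc : (PySem.Set.inter (PySem.Set.ofList (PySem.Str.split₀ nf)) (PySem.Str.split₀ (pvNormalize text))).length > bsc
      · rw [if_pos hsc, ih (some oid) _ (fun h => absurd h (by omega))]
        cases hcase : (if nf = "" then none else pvFirstSub nf rest) with
        | some o => rfl
        | none =>
          show pvBest (PySem.Set.ofList (PySem.Str.split₀ nf)) rest (some oid) _ =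
            (if (PySem.Set.inter (PySem.Set.ofList (PySem.Str.split₀ nf)) (PySem.Str.split₀ (pvNormalize text))).length > bsc
              then pvBest (PySem.Set.ofList (PySem.Str.split₀ nf)) rest (some oid) (PySem.Set.inter (PySem.Set.ofList (PySem.Str.split₀ nf)) (PySem.Str.split₀ (pvNormalize text))).length
              else pvBest (PySem.Set.ofList (PySem.Str.split₀ nf)) rest bid bsc)
          rw [if_pos hsc]
      · rw [if_neg hsc, ih bid bsc hinv]
        cases hcase : (if nf = "" then none else pvFirstSub nf rest) with
        | some o => rfl
        | none =>
          show pvBest (PySem.Set.ofList (PySem.Str.split₀ nf)) rest bid bsc =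
            (if (PySem.Set.inter (PySem.Set.ofList (PySem.Str.split₀ nf)) (PySem.Str.split₀ (pvNormalize text))).length > bsc
              then pvBest (PySem.Set.ofList (PySem.Str.split₀ nf)) rest (some oid) (PySem.Set.inter (PySem.Set.ofList (PySem.Str.split₀ nf)) (PySem.Str.split₀ (pvNormalize text))).length
              else pvBest (PySem.Set.ofList (PySem.Str.split₀ nf)) rest bid bsc)
          rw [if_neg hsc]

-- ===== VERDICT (by name: the statement is the Claim_ definition above) =====
theorem find_support_id_py_spec : Claim_equal_find_support_id_py := by
  intro fragment support_items _
  unfold Spec_find_support_id_py find_support_id_py find_support_id_py_alt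
  exact pvLoopA_eq (pvNormalize fragment) support_items none 0 (fun _ => rfl)
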